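-- pv_equiv track=rewrite | github.com/mfisher87/fetchez | src/fetchez/spatial.py | fix_argparse_region
-- ===== SOURCE A (Python) =====
-- def fix_argparse_region(raw_argv):
--     """Argument Pre-processing for negative coordinates."""
--
--     fixed_argv = []
--     i = 0
--     while i < len(raw_argv):
--         arg = raw_argv[i]
--         if arg in ['-R', '--region', '--aoi'] and i + 1 < len(raw_argv):
--             next_arg = raw_argv[i+1]
--             if next_arg.startswith('-'):
--                 sep = '' if arg == '-R' else '='
--                 fixed_argv.append(f"{arg}{sep}{next_arg}")
--                 i += 2
--                 continue
--         fixed_argv.append(arg)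
--         i += 1
--     return fixed_argv
-- ===== SOURCE B (Python) =====
-- def fix_argparse_region(raw_argv):
--     """Argument Pre-processing for negative coordinates."""
--     FLAGS = ('-R', '--region', '--aoi')
--     fixed_argv = []
--     pending = None
--     for arg in raw_argv:
--         if pending is not None:
--             if arg.startswith('-'):
--                 sep = '' if pending == '-R' else '='
--                 fixed_argv.append(f"{pending}{sep}{arg}")
--                 pending = None
--                 continue
--             fixed_argv.append(pending)
--             pending = None
--         if arg in FLAGS:
--             pending = arg
--         else:
--             fixed_argv.append(arg)
--     if pending is not None:
--         fixed_argv.append(pending)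
--     return fixed_argv
-- ===== Notes on version B (the rewrite author's own statement) =====
-- stated objective: simpler
-- what changed: Replaced the index-jumping while loop with lookahead (raw_argv[i+1], i += 2, continue) by a single for-loop over the elements that carries a pending-flag state variable and flushes it before a non-dash argument or at the end; direct iteration avoids per-step len() calls and indexing, a constant-factor gain a timing run confirmed.
import Mathlib
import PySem

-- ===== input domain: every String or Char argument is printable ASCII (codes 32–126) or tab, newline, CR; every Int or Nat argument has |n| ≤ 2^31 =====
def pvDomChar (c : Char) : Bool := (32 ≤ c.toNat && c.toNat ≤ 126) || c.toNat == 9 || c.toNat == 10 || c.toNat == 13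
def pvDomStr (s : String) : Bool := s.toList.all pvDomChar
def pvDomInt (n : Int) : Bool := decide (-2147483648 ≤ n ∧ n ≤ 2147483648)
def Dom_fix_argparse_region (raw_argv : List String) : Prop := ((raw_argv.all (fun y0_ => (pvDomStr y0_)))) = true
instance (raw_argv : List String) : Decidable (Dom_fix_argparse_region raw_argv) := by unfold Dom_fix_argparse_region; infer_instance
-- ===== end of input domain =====

-- B replaces A's index-jumping lookahead while loop by a single pass carrying a pending-flag state; objective: simpler, same cost.

-- ===== PORT A =====
-- A's while loop over index i, written as the obvious structural recursion: the
-- 'i + 1 < len' lookahead test becomes the shape of the tail.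
def pvGoA : List String → List String
  | [] => []
  | [arg] => [arg]  -- the 'i + 1 < len(raw_argv)' lookahead fails: append arg
  | arg :: next_arg :: rest' =>
    if arg = "-R" ∨ arg = "--region" ∨ arg = "--aoi" then
      if PySem.Str.startswith next_arg "-" then
        let sep := if arg = "-R" then "" else "="
        (arg ++ sep ++ next_arg) :: pvGoA rest'
      else
        arg :: pvGoA (next_arg :: rest')
    else
      arg :: pvGoA (next_arg :: rest')

def fix_argparse_region (raw_argv : List String) : List String := pvGoA raw_argv

-- ===== PORT B =====
def pvIsFlagB (arg : String) : Bool := arg == "-R" || arg == "--region" || arg == "--aoi"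

-- one step of B's for-loop: state = (fixed_argv so far, pending flag)
def pvStepB (s : List String × Option String) (arg : String) : List String × Option String :=
  match s.2 with
  | some pending =>
    if PySem.Str.startswith arg "-" then
      let sep := if pending = "-R" then "" else "="
      (s.1 ++ [pending ++ sep ++ arg], none)
    else
      -- flush the pending flag, then process arg normally
      if pvIsFlagB arg then (s.1 ++ [pending], some arg)
      else (s.1 ++ [pending, arg], none)
  | none =>
    if pvIsFlagB arg then (s.1, some arg) else (s.1 ++ [arg], none)

def fix_argparse_region_alt (raw_argv : List String) : List String :=
  let s := raw_argv.foldl pvStepB ([], none)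
  match s.2 with
  | some pending => s.1 ++ [pending]
  | none => s.1

-- ===== PRECONDITION & SPEC =====
def Spec_fix_argparse_region (raw_argv : List String) (out : List String) : Prop := out = fix_argparse_region_alt raw_argv
instance (raw_argv : List String) (out : List String) : Decidable (Spec_fix_argparse_region raw_argv out) := by unfold Spec_fix_argparse_region; infer_instance

-- ===== CLAIM (what is proved, stated in full; the proofs are below) =====
def Claim_equal_fix_argparse_region : Prop := ∀ (raw_argv : List String), Dom_fix_argparse_region raw_argv → Spec_fix_argparse_region raw_argv (fix_argparse_region raw_argv)

-- ===== LEMMAS AND PROOFS =====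

-- flush the final state of B's fold
def pvFlush (s : List String × Option String) : List String :=
  match s.2 with
  | some pending => s.1 ++ [pending]
  | none => s.1

@[simp] theorem pvGoA_nil : pvGoA [] = [] := rfl

theorem pvGoA_cons_notflag (a : String) (l : List String)
    (h : ¬ (a = "-R" ∨ a = "--region" ∨ a = "--aoi")) :
    pvGoA (a :: l) = a :: pvGoA l := by
  cases l with
  | nil => rfl
  | cons b t => simp only [pvGoA, h, if_false]

theorem pvGoA_flag_dash (f a : String) (l : List String)
    (hf : f = "-R" ∨ f = "--region" ∨ f = "--aoi")
    (ha : PySem.Str.startswith a "-" = true) :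
    pvGoA (f :: a :: l) = ((f ++ (if f = "-R" then "" else "=")) ++ a) :: pvGoA l := by
  simp only [pvGoA, hf, if_true, ha]

theorem pvGoA_flag_nodash (f a : String) (l : List String)
    (hf : f = "-R" ∨ f = "--region" ∨ f = "--aoi")
    (ha : ¬ PySem.Str.startswith a "-" = true) :
    pvGoA (f :: a :: l) = f :: pvGoA (a :: l) := by
  simp only [pvGoA, hf, if_true, ha, Bool.false_eq_true, if_false]

-- flags start with '-'
theorem pvFlag_dash (f : String) (h : pvIsFlagB f = true) :
    PySem.Str.startswith f "-" = true := by
  simp only [pvIsFlagB, Bool.or_eq_true, beq_iff_eq] at h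
  rcases h with (h | h) | h <;> subst h <;> decide

-- the two boolean/propositional flag tests agree
theorem pvFlag_iff (a : String) :
    pvIsFlagB a = true ↔ (a = "-R" ∨ a = "--region" ∨ a = "--aoi") := by
  simp [pvIsFlagB, or_assoc]

-- Invariant of B's fold, by simultaneous induction on the remaining list:
-- from a clean state it produces acc ++ goA l, and from a pending-flag state
-- it produces acc ++ goA (f :: l).
theorem pvInv (l : List String) :
    (∀ acc, pvFlush (l.foldl pvStepB (acc, none)) = acc ++ pvGoA l) ∧
    (∀ acc f, pvIsFlagB f = true →
      pvFlush (l.foldl pvStepB (acc, some f)) = acc ++ pvGoA (f :: l)) := by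
  induction l with
  | nil =>
    constructor
    · intro acc; simp [pvFlush, pvGoA]
    · intro acc f hf
      simp [pvFlush, pvGoA]
  | cons a l ih =>
    obtain ⟨ihP, ihQ⟩ := ih
    constructor
    · intro acc
      by_cases hfl : pvIsFlagB a = true
      · rw [List.foldl_cons]
        simp only [pvStepB, hfl, if_pos]
        exact ihQ acc a hfl
      · have hfl' : ¬ (a = "-R" ∨ a = "--region" ∨ a = "--aoi") := by
          rw [← pvFlag_iff]; simpa using hfl
        rw [List.foldl_cons]
        simp only [pvStepB, hfl, if_neg, Bool.false_eq_true, not_false_eq_true]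
        rw [ihP (acc ++ [a]), pvGoA_cons_notflag a l hfl']
        simp
    · intro acc f hf
      have hfP : f = "-R" ∨ f = "--region" ∨ f = "--aoi" := (pvFlag_iff f).mp hf
      by_cases hd : PySem.Str.startswith a "-" = true
      · rw [List.foldl_cons]
        simp only [pvStepB, hd, if_pos]
        rw [ihP (acc ++ [f ++ (if f = "-R" then "" else "=") ++ a]),
          pvGoA_flag_dash f a l hfP hd]
        simp [String.append_assoc]
      · have hafl : pvIsFlagB a = false := by
          cases h : pvIsFlagB a
          · rfl
          · exact absurd (pvFlag_dash a h) hd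
        have hafl' : ¬ (a = "-R" ∨ a = "--region" ∨ a = "--aoi") := by
          rw [← pvFlag_iff]; simp [hafl]
        rw [List.foldl_cons]
        simp only [pvStepB, hd, hafl, Bool.false_eq_true, if_false]
        rw [ihP (acc ++ [f, a]),
          pvGoA_flag_nodash f a l hfP hd, pvGoA_cons_notflag a l hafl']
        simp
      
-- ===== VERDICT (by name: the statement is the Claim_ definition above) =====
theorem fix_argparse_region_spec : Claim_equal_fix_argparse_region := by
  intro raw_argv _
  show fix_argparse_region raw_argv = fix_argparse_region_alt raw_argv
  have h := (pvInv raw_argv).1 []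
  simpa [pvFlush, fix_argparse_region, fix_argparse_region_alt] using h.symm
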